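-- pv_equiv track=rewrite | github.com/Voz-bonita/Aquae__extra__ | Tarifas_Agua.py | meio_arr
-- ===== SOURCE A (Python) =====
-- def meio_arr(meio: list):
--     maior = float("-inf")
--     agrupado = []
--     grupo = []
--
--     for intervalo in meio:
--         if intervalo[1] < maior:
--             grupo.append({"min": grupo[-1]["max"] + 1, "max": 99999999999})
--             agrupado.append(grupo.copy())
--             grupo.clear()
--
--         maior = intervalo[1]
--         grupo.append({"min": intervalo[0], "max": intervalo[1]})
--
--     agrupado.append(grupo.copy())
--     return agrupado
-- ===== SOURCE B (Python) =====
-- def meio_arr(meio: list):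
--     # Pass 1: partition into maximal runs that are non-decreasing in x[1];
--     # there is always at least one (possibly empty) run.
--     runs = [[]]
--     for iv in meio:
--         if runs[-1] and iv[1] < runs[-1][-1][1]:
--             runs.append([])
--         runs[-1].append(iv)
--     # Pass 2: format each run; every run except the last gets the sentinel.
--     out = [[{"min": x[0], "max": x[1]} for x in run]
--            + [{"min": run[-1][1] + 1, "max": 99999999999}]
--            for run in runs[:-1]]
--     out.append([{"min": x[0], "max": x[1]} for x in runs[-1]])
--     return out
-- ===== Notes on version B (the rewrite author's own statement) =====
-- stated objective: simpler
-- what changed: Replaces A's incremental state machine (running max, accumulate-copy-clear group buffer) with two passes: first partition the list into maximal runs that are non-decreasing in x[1], then format every run and append the sentinel to all runs but the last.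
import Mathlib
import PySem

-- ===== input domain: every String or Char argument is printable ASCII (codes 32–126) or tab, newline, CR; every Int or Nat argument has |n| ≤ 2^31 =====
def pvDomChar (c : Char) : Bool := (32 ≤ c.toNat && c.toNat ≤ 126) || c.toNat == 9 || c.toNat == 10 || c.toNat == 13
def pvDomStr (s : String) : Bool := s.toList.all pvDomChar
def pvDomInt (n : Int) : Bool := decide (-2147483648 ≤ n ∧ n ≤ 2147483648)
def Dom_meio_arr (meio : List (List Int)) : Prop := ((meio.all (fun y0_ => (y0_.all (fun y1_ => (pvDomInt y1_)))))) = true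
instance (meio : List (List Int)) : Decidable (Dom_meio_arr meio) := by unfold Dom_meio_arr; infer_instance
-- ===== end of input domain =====

-- B re-implements A as partition-into-runs followed by formatting (same cost; different decomposition).

-- ===== PORT A =====
-- One iteration of A's for-loop; state = (maior, agrupado, grupo), maior none = float("-inf").
-- intervalo[i] is PySem.List.pyGet? …; its .getD 0 default is reached only outside Pre_.
-- grupo[-1]["max"] is first-match lookup on the two-entry dict, exact here.
def meio_arrStep (st : Option Int × List (List (List (String × Int))) × List (List (String × Int)))
    (intervalo : List Int) :
    Option Int × List (List (List (String × Int))) × List (List (String × Int)) :=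
  let maior := st.1
  let agrupado := st.2.1
  let grupo := st.2.2
  let iv1 := (PySem.List.pyGet? intervalo 1).getD 0
  let iv0 := (PySem.List.pyGet? intervalo 0).getD 0
  let split : Bool := match maior with
    | some m => decide (iv1 < m)
    | none => false            -- nothing is < float("-inf")
  let (agrupado, grupo) :=
    if split then
      let grupo' := grupo ++
        [[("min", ((((PySem.List.pyGet? grupo (-1)).getD []).lookup "max").getD 0) + 1),
          ("max", (99999999999 : Int))]]
      (agrupado ++ [grupo'], ([] : List (List (String × Int))))
    else (agrupado, grupo)
  (some iv1, agrupado, grupo ++ [[("min", iv0), ("max", iv1)]])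

def meio_arr (meio : List (List Int)) : List (List (List (String × Int))) :=
  let st := meio.foldl meio_arrStep (none, [], [])
  st.2.1 ++ [st.2.2]

-- ===== PORT B =====
-- Pass 1 of Source B, one iteration: append iv to runs[-1], opening a new run when x[1] decreases
-- against the last element of the current (non-empty) last run.
def meio_arr_altStep (runs : List (List (List Int))) (iv : List Int) : List (List (List Int)) :=
  let last := (PySem.List.pyGet? runs (-1)).getD []
  let iv1 := (PySem.List.pyGet? iv 1).getD 0
  if !last.isEmpty &&
      decide (iv1 < (PySem.List.pyGet? ((PySem.List.pyGet? last (-1)).getD []) 1).getD 0) then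
    runs ++ [[iv]]
  else
    runs.dropLast ++ [last ++ [iv]]

def meio_arr_alt (meio : List (List Int)) : List (List (List (String × Int))) :=
  let runs := meio.foldl meio_arr_altStep [[]]
  -- Pass 2 of Source B: format runs[:-1] (with sentinel) then runs[-1] (without).
  (PySem.List.slice runs none (some (-1))).map
    (fun run =>
      run.map (fun x => [("min", (PySem.List.pyGet? x 0).getD 0), ("max", (PySem.List.pyGet? x 1).getD 0)])
      ++ [[("min", ((PySem.List.pyGet? ((PySem.List.pyGet? run (-1)).getD []) 1).getD 0) + 1),
           ("max", (99999999999 : Int))]])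
  ++ [((PySem.List.pyGet? runs (-1)).getD []).map
        (fun x => [("min", (PySem.List.pyGet? x 0).getD 0), ("max", (PySem.List.pyGet? x 1).getD 0)])]

-- ===== PRECONDITION & SPEC =====
-- Pre_: every inner list has at least two elements; on shorter ones both A and B raise
-- IndexError at intervalo[1] / iv[1].
def Pre_meio_arr (meio : List (List Int)) : Prop := ∀ l ∈ meio, 2 ≤ l.length
instance (meio : List (List Int)) : Decidable (Pre_meio_arr meio) := by unfold Pre_meio_arr; infer_instance
def pvWitness_meio_arr : List (List Int) := [[1, 5], [2, 3], [4, 4]]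
def Spec_meio_arr (meio : List (List Int)) (out : List (List (List (String × Int)))) : Prop := out = meio_arr_alt meio
instance (meio : List (List Int)) (out : List (List (List (String × Int)))) : Decidable (Spec_meio_arr meio out) := by unfold Spec_meio_arr; infer_instance

-- ===== CLAIM (what is proved, stated in full; the proofs are below) =====
def Claim_equal_meio_arr : Prop := ∀ (meio : List (List Int)), Dom_meio_arr meio → Pre_meio_arr meio → Spec_meio_arr meio (meio_arr meio)

-- ===== LEMMAS AND PROOFS =====

def pvG1 (x : List Int) : Int := (PySem.List.pyGet? x 1).getD 0
def pvG0 (x : List Int) : Int := (PySem.List.pyGet? x 0).getD 0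
def pvFmt (x : List Int) : List (String × Int) := [("min", pvG0 x), ("max", pvG1 x)]
def pvSent (run : List (List Int)) : List (String × Int) :=
  [("min", pvG1 (run.getLast?.getD []) + 1), ("max", (99999999999 : Int))]

-- the common reference: maximal runs non-decreasing in pvG1, starting from current run `cur`
def pvRuns : List (List Int) → List (List Int) → List (List (List Int))
  | cur, [] => [cur]
  | cur, iv :: rest =>
    if cur ≠ [] ∧ pvG1 iv < pvG1 (cur.getLast?.getD []) then
      cur :: pvRuns [iv] rest
    else pvRuns (cur ++ [iv]) rest

def pvFormat : List (List (List Int)) → List (List (List (String × Int)))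
  | [] => []
  | [r] => [r.map pvFmt]
  | r :: rs => (r.map pvFmt ++ [pvSent r]) :: pvFormat rs

theorem pvRuns_ne_nil (cur : List (List Int)) (l : List (List Int)) : pvRuns cur l ≠ [] := by
  induction l generalizing cur with
  | nil => simp [pvRuns]
  | cons iv rest ih =>
    unfold pvRuns
    split_ifs <;> simp [ih]

theorem pvFormat_cons (r : List (List Int)) (rs : List (List (List Int))) (h : rs ≠ []) :
    pvFormat (r :: rs) = (r.map pvFmt ++ [pvSent r]) :: pvFormat rs := by
  cases rs with
  | nil => exact absurd rfl h
  | cons a as => rfl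

theorem pvLookup_max (a b : Int) :
    ((List.lookup "max" [("min", a), ("max", b)]).getD 0) = b := by
  simp [List.lookup]

-- one A-step when the group splits
theorem pvStepA_split (cur : List (List Int)) (agrupado : List (List (List (String × Int))))
    (iv : List Int) (hne : cur ≠ []) (hlt : pvG1 iv < pvG1 (cur.getLast?.getD [])) :
    meio_arrStep (cur.getLast?.map pvG1, agrupado, cur.map pvFmt) iv =
      (([iv].getLast?.map pvG1),
        agrupado ++ [cur.map pvFmt ++ [pvSent cur]], [iv].map pvFmt) := by
  obtain ⟨a, ha⟩ := Option.ne_none_iff_exists'.mp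
    (fun h => hne (List.getLast?_eq_none_iff.mp h))
  have hsplit : ((PySem.List.pyGet? iv 1).getD 0 < pvG1 a) := by
    rw [ha] at hlt; simpa [pvG1] using hlt
  simp only [meio_arrStep, Option.map_some, decide_eq_true hsplit, if_true,
    PySem.List.pyGet?_neg_one, List.getLast?_map, ha, Option.map_some, Option.getD_some]
  simp [pvFmt, pvSent, pvLookup_max, ha, pvG0, pvG1]

-- one A-step when the group continues
theorem pvStepA_cont (cur : List (List Int)) (agrupado : List (List (List (String × Int))))
    (iv : List Int) (h : ¬ (cur ≠ [] ∧ pvG1 iv < pvG1 (cur.getLast?.getD []))) :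
    meio_arrStep (cur.getLast?.map pvG1, agrupado, cur.map pvFmt) iv =
      ((cur ++ [iv]).getLast?.map pvG1, agrupado, (cur ++ [iv]).map pvFmt) := by
  have hsplit : (match cur.getLast?.map pvG1 with
      | some m => decide ((PySem.List.pyGet? iv 1).getD 0 < m)
      | none => false) = false := by
    push Not at h
    cases hcl : cur.getLast? with
    | none => simp
    | some a =>
      have hne : cur ≠ [] := by intro h'; subst h'; simp at hcl
      have := h hne
      rw [hcl] at this
      simp only [Option.getD_some] at this
      simp only [Option.map_some]
      simpa [pvG1] using this
  simp only [meio_arrStep, hsplit, Bool.false_eq_true, if_false]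
  simp [pvFmt, pvG0, pvG1]

-- A's fold from a coherent state computes the formatted runs
theorem pvA_loop (rest : List (List Int)) (agrupado : List (List (List (String × Int))))
    (cur : List (List Int)) :
    (fun st => st.2.1 ++ [st.2.2])
      (rest.foldl meio_arrStep (cur.getLast?.map pvG1, agrupado, cur.map pvFmt))
    = agrupado ++ pvFormat (pvRuns cur rest) := by
  induction rest generalizing agrupado cur with
  | nil => simp [pvRuns, pvFormat]
  | cons iv rest ih =>
    by_cases hc : cur ≠ [] ∧ pvG1 iv < pvG1 (cur.getLast?.getD [])
    · rw [List.foldl_cons, pvStepA_split cur agrupado iv hc.1 hc.2, ih,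
        pvRuns, if_pos hc, pvFormat_cons _ _ (pvRuns_ne_nil [iv] rest)]
      simp
    · rw [List.foldl_cons, pvStepA_cont cur agrupado iv hc, ih, pvRuns, if_neg hc]

-- one B-step, split / continue
theorem pvStepB_split (done : List (List (List Int))) (cur : List (List Int)) (iv : List Int)
    (hne : cur ≠ []) (hlt : pvG1 iv < pvG1 (cur.getLast?.getD [])) :
    meio_arr_altStep (done ++ [cur]) iv = (done ++ [cur]) ++ [[iv]] := by
  have hcond : (!cur.isEmpty &&
      decide ((PySem.List.pyGet? iv 1).getD 0 <
        (PySem.List.pyGet? ((PySem.List.pyGet? cur (-1)).getD []) 1).getD 0)) = true := by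
    rw [PySem.List.pyGet?_neg_one]
    simp only [Bool.and_eq_true, Bool.not_eq_true', List.isEmpty_eq_false_iff, decide_eq_true_eq]
    exact ⟨hne, hlt⟩
  simp only [meio_arr_altStep, PySem.List.pyGet?_neg_one_append_singleton, Option.getD_some,
    hcond, if_true]

theorem pvStepB_cont (done : List (List (List Int))) (cur : List (List Int)) (iv : List Int)
    (h : ¬ (cur ≠ [] ∧ pvG1 iv < pvG1 (cur.getLast?.getD []))) :
    meio_arr_altStep (done ++ [cur]) iv = done ++ [cur ++ [iv]] := by
  have hcond : (!cur.isEmpty &&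
      decide ((PySem.List.pyGet? iv 1).getD 0 <
        (PySem.List.pyGet? ((PySem.List.pyGet? cur (-1)).getD []) 1).getD 0)) = false := by
    rw [PySem.List.pyGet?_neg_one]
    push Not at h
    simp only [Bool.and_eq_false_iff, Bool.not_eq_false', List.isEmpty_iff,
      decide_eq_false_iff_not, not_lt]
    by_cases hne : cur = []
    · exact Or.inl hne
    · exact Or.inr (by simpa [pvG1] using h hne)
  simp only [meio_arr_altStep, PySem.List.pyGet?_neg_one_append_singleton, Option.getD_some,
    hcond, Bool.false_eq_true, if_false]
  simp

-- B's pass-1 fold computes the runs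
theorem pvB_loop (rest : List (List Int)) (done : List (List (List Int)))
    (cur : List (List Int)) :
    rest.foldl meio_arr_altStep (done ++ [cur]) = done ++ pvRuns cur rest := by
  induction rest generalizing done cur with
  | nil => simp [pvRuns]
  | cons iv rest ih =>
    by_cases hc : cur ≠ [] ∧ pvG1 iv < pvG1 (cur.getLast?.getD [])
    · rw [List.foldl_cons, pvStepB_split done cur iv hc.1 hc.2,
        ih (done ++ [cur]) [iv], pvRuns, if_pos hc]
      simp
    · rw [List.foldl_cons, pvStepB_cont done cur iv hc, ih done (cur ++ [iv]),
        pvRuns, if_neg hc]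

-- B's pass-2 equals pvFormat, for non-empty runs
theorem pvB_format (runs : List (List (List Int))) (h : runs ≠ []) :
    (PySem.List.slice runs none (some (-1))).map
      (fun run =>
        run.map (fun x => [("min", (PySem.List.pyGet? x 0).getD 0), ("max", (PySem.List.pyGet? x 1).getD 0)])
        ++ [[("min", ((PySem.List.pyGet? ((PySem.List.pyGet? run (-1)).getD []) 1).getD 0) + 1),
             ("max", (99999999999 : Int))]])
    ++ [((PySem.List.pyGet? runs (-1)).getD []).map
          (fun x => [("min", (PySem.List.pyGet? x 0).getD 0), ("max", (PySem.List.pyGet? x 1).getD 0)])]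
    = pvFormat runs := by
  rw [PySem.List.slice_to_neg_one, PySem.List.pyGet?_neg_one]
  induction runs with
  | nil => exact absurd rfl h
  | cons r rs ih =>
    cases rs with
    | nil => simp [pvFormat, pvFmt, pvG0, pvG1]
    | cons a as =>
      rw [pvFormat_cons _ _ (by simp)]
      have := ih (by simp)
      simp only [List.dropLast_cons_of_ne_nil (by simp : (a :: as) ≠ []), List.map_cons,
        List.getLast?_cons_cons] at this ⊢
      rw [List.cons_append, this]
      simp [pvFmt, pvG0, pvG1, pvSent, PySem.List.pyGet?_neg_one]

-- ===== VERDICT (by name: the statement is the Claim_ definition above) =====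
theorem meio_arr_spec : Claim_equal_meio_arr := by
  intro meio _ _
  unfold Spec_meio_arr meio_arr meio_arr_alt
  have hA := pvA_loop meio [] []
  simp only [List.getLast?_nil, Option.map_none, List.map_nil, List.nil_append] at hA
  have hB := pvB_loop meio [] []
  simp only [List.nil_append] at hB
  simp only [hA, hB]
  exact (pvB_format (pvRuns [] meio) (pvRuns_ne_nil [] meio)).symm
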